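-- pv_equiv track=rewrite | github.com/eitanporat/navi | navi/core/scheduler/hourly_reflection_scheduler.py | _format_tasks_for_analysis
-- ===== SOURCE A (Python) =====
-- from typing import Dict, List, Optional
--
-- def _format_tasks_for_analysis(tasks: List[Dict]) -> str:
--     """Format tasks for analysis prompt"""
--     if not tasks:
--         return "No tasks currently set"
--
--     pending_tasks = [t for t in tasks if t.get('status') == 'PENDING']
--     completed_tasks = [t for t in tasks if t.get('status') == 'COMPLETED']
--     in_progress_tasks = [t for t in tasks if t.get('status') == 'IN_PROGRESS']
--
--     analysis = f"PENDING: {len(pending_tasks)}, IN_PROGRESS: {len(in_progress_tasks)}, COMPLETED: {len(completed_tasks)}"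
--
--     # Add some specific overdue/important tasks
--     task_details = []
--     for task in pending_tasks[:5]:  # Show up to 5 pending tasks
--         task_details.append(f"- {task.get('description', 'No description')} (Due: {task.get('due_date', 'No due date')})")
--
--     if task_details:
--         analysis += f"\nKey Pending Tasks:\n" + '\n'.join(task_details)
--
--     return analysis
-- ===== SOURCE B (Python) =====
-- from typing import Dict, List
--
-- def _format_tasks_for_analysis(tasks: List[Dict]) -> str:
--     """Single pass: count all three statuses and collect up to 5 pending-task
--     detail lines at the same time."""
--     if not tasks:
--         return "No tasks currently set"
--
--     pending = in_progress = completed = 0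
--     details = []
--     for task in tasks:
--         status = task.get('status')
--         if status == 'PENDING':
--             pending += 1
--             if len(details) < 5:
--                 details.append(
--                     f"- {task.get('description', 'No description')} (Due: {task.get('due_date', 'No due date')})")
--         elif status == 'IN_PROGRESS':
--             in_progress += 1
--         elif status == 'COMPLETED':
--             completed += 1
--
--     analysis = f"PENDING: {pending}, IN_PROGRESS: {in_progress}, COMPLETED: {completed}"
--     if details:
--         analysis += "\nKey Pending Tasks:\n" + '\n'.join(details)
--     return analysis
-- ===== Notes on version B (the rewrite author's own statement) =====
-- stated objective: alternative
-- what changed: Replaces A's three separate list-comprehension filters plus a second loop over the pending slice with one pass over the tasks that maintains three counters and collects at most five pending detail lines on the fly.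
import Mathlib
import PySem

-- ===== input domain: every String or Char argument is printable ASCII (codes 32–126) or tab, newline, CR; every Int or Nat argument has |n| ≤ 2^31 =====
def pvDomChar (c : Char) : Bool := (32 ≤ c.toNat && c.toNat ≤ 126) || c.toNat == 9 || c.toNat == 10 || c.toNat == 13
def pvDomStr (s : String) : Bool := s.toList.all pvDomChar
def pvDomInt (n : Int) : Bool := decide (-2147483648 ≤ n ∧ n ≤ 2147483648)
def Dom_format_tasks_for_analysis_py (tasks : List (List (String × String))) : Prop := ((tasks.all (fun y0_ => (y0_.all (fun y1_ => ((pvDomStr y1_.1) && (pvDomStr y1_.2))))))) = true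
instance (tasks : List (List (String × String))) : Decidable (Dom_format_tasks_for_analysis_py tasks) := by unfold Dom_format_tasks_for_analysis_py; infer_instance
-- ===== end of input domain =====

-- B replaces A's three filter passes plus a slice loop by one pass with three counters
-- and an at-most-5 details accumulator (objective: alternative single-traversal decomposition).

-- ===== PORT A =====
-- task.get('status') (no default → None) on the association-list dict
def pvStatusA (t : List (String × String)) : Option String :=
  (PySem.Dict.mk t).get? "status"

-- f"- {task.get('description','No description')} (Due: {task.get('due_date','No due date')})"
def pvDetailLine (t : List (String × String)) : String :=
  "- " ++ PySem.Dict.getD (PySem.Dict.mk t) "description" "No description" ++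
  " (Due: " ++ PySem.Dict.getD (PySem.Dict.mk t) "due_date" "No due date" ++ ")"

def format_tasks_for_analysis_py (tasks : List (List (String × String))) : String :=
  if tasks = [] then "No tasks currently set"
  else
    let pending_tasks := tasks.filter (fun t => pvStatusA t == some "PENDING")
    let completed_tasks := tasks.filter (fun t => pvStatusA t == some "COMPLETED")
    let in_progress_tasks := tasks.filter (fun t => pvStatusA t == some "IN_PROGRESS")
    let analysis := "PENDING: " ++ PySem.Int.toStr pending_tasks.length ++
      ", IN_PROGRESS: " ++ PySem.Int.toStr in_progress_tasks.length ++
      ", COMPLETED: " ++ PySem.Int.toStr completed_tasks.length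
    -- for task in pending_tasks[:5]: task_details.append(…)
    let task_details := (PySem.List.slice pending_tasks none (some 5)).foldl
      (fun acc t => acc ++ [pvDetailLine t]) []
    if task_details = [] then analysis
    else analysis ++ "\nKey Pending Tasks:\n" ++ PySem.Str.join "\n" task_details

-- ===== PORT B =====
-- the single pass of Source B: three counters plus the details accumulator
def pvAltLoop : List (List (String × String)) → Int → Int → Int → List String →
    Int × Int × Int × List String
  | [], p, i, c, ds => (p, i, c, ds)
  | t :: ts, p, i, c, ds =>
    let status := pvStatusA t
    if status == some "PENDING" then
      pvAltLoop ts (p + 1) i c (if ds.length < 5 then ds ++ [pvDetailLine t] else ds)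
    else if status == some "IN_PROGRESS" then
      pvAltLoop ts p (i + 1) c ds
    else if status == some "COMPLETED" then
      pvAltLoop ts p i (c + 1) ds
    else
      pvAltLoop ts p i c ds

def format_tasks_for_analysis_py_alt (tasks : List (List (String × String))) : String :=
  if tasks = [] then "No tasks currently set"
  else
    let r := pvAltLoop tasks 0 0 0 []
    let analysis := "PENDING: " ++ PySem.Int.toStr r.1 ++
      ", IN_PROGRESS: " ++ PySem.Int.toStr r.2.1 ++
      ", COMPLETED: " ++ PySem.Int.toStr r.2.2.1
    if r.2.2.2 = [] then analysis
    else analysis ++ "\nKey Pending Tasks:\n" ++ PySem.Str.join "\n" r.2.2.2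

-- ===== PRECONDITION & SPEC =====
def Spec_format_tasks_for_analysis_py (tasks : List (List (String × String))) (out : String) : Prop := out = format_tasks_for_analysis_py_alt tasks
instance (tasks : List (List (String × String))) (out : String) : Decidable (Spec_format_tasks_for_analysis_py tasks out) := by unfold Spec_format_tasks_for_analysis_py; infer_instance

-- ===== CLAIM (what is proved, stated in full; the proofs are below) =====
def Claim_equal_format_tasks_for_analysis_py : Prop := ∀ (tasks : List (List (String × String))), Dom_format_tasks_for_analysis_py tasks → Spec_format_tasks_for_analysis_py tasks (format_tasks_for_analysis_py tasks)

-- ===== LEMMAS AND PROOFS =====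

-- the single pass computes the three filter counts and the first (5 - |ds|) pending details
theorem pvAltLoop_eq (ts : List (List (String × String))) (p i c : Int) (ds : List String) :
    pvAltLoop ts p i c ds =
      (p + (ts.filter (fun t => pvStatusA t == some "PENDING")).length,
       i + (ts.filter (fun t => pvStatusA t == some "IN_PROGRESS")).length,
       c + (ts.filter (fun t => pvStatusA t == some "COMPLETED")).length,
       ds ++ ((ts.filter (fun t => pvStatusA t == some "PENDING")).take (5 - ds.length)).map
         pvDetailLine) := by
  induction ts generalizing p i c ds with
  | nil => simp [pvAltLoop]
  | cons t ts ih =>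
    simp only [pvAltLoop, List.filter_cons]
    by_cases hP : (pvStatusA t == some "PENDING") = true
    · have hPe : pvStatusA t = some "PENDING" := by simpa using hP
      rw [if_pos hP]
      by_cases hlt : ds.length < 5
      · rw [if_pos hlt, ih]
        have h5 : 5 - ds.length = (5 - (ds.length + 1)) + 1 := by omega
        simp [hPe, h5, List.append_assoc, Prod.ext_iff]
        omega
      · rw [if_neg hlt, ih]
        have h5 : 5 - ds.length = 0 := by omega
        simp [hPe, h5, Prod.ext_iff]
        omega
    · rw [if_neg hP]
      by_cases hI : (pvStatusA t == some "IN_PROGRESS") = true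
      · have hIe : pvStatusA t = some "IN_PROGRESS" := by simpa using hI
        rw [if_pos hI, ih]
        simp [hIe, Prod.ext_iff]
        omega
      · rw [if_neg hI]
        by_cases hC : (pvStatusA t == some "COMPLETED") = true
        · have hCe : pvStatusA t = some "COMPLETED" := by simpa using hC
          rw [if_pos hC, ih]
          simp [hCe, Prod.ext_iff]
          omega
        · rw [if_neg hC, ih]
          simp [hP, hI, hC]

theorem foldl_detail (xs : List (List (String × String))) (acc : List String) :
    xs.foldl (fun a t => a ++ [pvDetailLine t]) acc = acc ++ xs.map pvDetailLine := by
  induction xs generalizing acc with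
  | nil => simp
  | cons x xs ih => simp [List.foldl_cons, ih]

-- ===== VERDICT (by name: the statement is the Claim_ definition above) =====
theorem format_tasks_for_analysis_py_spec : Claim_equal_format_tasks_for_analysis_py := by
  intro tasks _
  unfold Spec_format_tasks_for_analysis_py
  unfold format_tasks_for_analysis_py format_tasks_for_analysis_py_alt
  by_cases h : tasks = []
  · simp [h]
  · simp only [if_neg h]
    rw [pvAltLoop_eq, PySem.List.slice_to _ (by norm_num), foldl_detail]
    simp only [List.nil_append, List.length_nil, Nat.sub_zero, zero_add]
    rfl
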